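-- pv_equiv track=rewrite | github.com/pallyloco/AdventOfCode | 2023/kattis_stretching.py | get_non_repeating
-- ===== SOURCE A (Python) =====
-- def get_non_repeating(p):
--     not_allowed = set()
--     allowed = set()
--     first_char = p[0]
--     for c1 in p:
--         if c1 == p[-1]:
--             continue
--         for c2 in p:
--             substring = c1+c2
--             if c2 == first_char:
--                 allowed.add(substring)
--             elif c1+c2 in p:
--                 allowed.add(substring)
--             else:
--                 not_allowed.add(substring)
--     return not_allowed
-- ===== SOURCE B (Python) =====
-- def get_non_repeating(p):
--     # successor map: for each char, the set of chars that follow it somewhere in p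
--     succ = {}
--     for a, b in zip(p, p[1:]):
--         succ.setdefault(a, set()).add(b)
--     heads = set(p) - {p[-1]}
--     tails = set(p) - {p[0]}
--     result = set()
--     for c1 in heads:
--         for c2 in tails - succ.get(c1, set()):
--             result.add(c1 + c2)
--     return result
-- ===== Notes on version B (the rewrite author's own statement) =====
-- stated objective: faster
-- what changed: B builds a successor map (char -> set of chars that follow it in p) in one pass and computes the answer by set algebra - for each head character the missing tails are a single set difference (tails - succ[c1]) - instead of A's triple-nested positional loops with a substring scan of p for every character pair.
import Mathlib
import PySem

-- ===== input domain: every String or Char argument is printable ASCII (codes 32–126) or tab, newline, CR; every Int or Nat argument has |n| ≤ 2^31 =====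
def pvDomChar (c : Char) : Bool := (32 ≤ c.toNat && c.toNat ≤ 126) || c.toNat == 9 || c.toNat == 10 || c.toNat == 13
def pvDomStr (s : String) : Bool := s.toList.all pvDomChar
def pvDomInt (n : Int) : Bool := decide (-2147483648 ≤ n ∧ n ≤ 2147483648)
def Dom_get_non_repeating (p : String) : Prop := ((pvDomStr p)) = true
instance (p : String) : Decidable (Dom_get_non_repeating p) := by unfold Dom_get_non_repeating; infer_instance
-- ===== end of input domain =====

-- B builds a successor map (char -> set of following chars) in one pass and obtains each head's
-- missing tails by a single set difference, replacing A's nested positional loops with a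
-- substring scan per pair (objective: faster).

-- ===== PORT A =====
def get_non_repeating (p : String) : List String :=
  -- first_char = p[0] and the use of p[-1] raise IndexError on p = "" (excluded by Pre_)
  match PySem.Str.pyGet? p 0, PySem.Str.pyGet? p (-1) with
  | some first_char, some last_char =>
      -- state = (not_allowed, allowed), both Python sets
      (p.toList.foldl
        (fun (st : PySem.Set String × PySem.Set String) c1 =>
          if c1 == last_char then st
          else p.toList.foldl
            (fun (st : PySem.Set String × PySem.Set String) c2 =>
              let substring := String.ofList [c1, c2]
              if c2 == first_char then (st.1, st.2.add substring)
              else if PySem.Str.isIn (String.ofList [c1, c2]) p then (st.1, st.2.add substring)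
              else (st.1.add substring, st.2)) st)
        (PySem.Set.empty, PySem.Set.empty)).1
  | _, _ => []

-- ===== PORT B =====
def get_non_repeating_alt (p : String) : List String :=
  let l := p.toList
  -- succ = {}; for a, b in zip(p, p[1:]): succ.setdefault(a, set()).add(b)
  let succ : PySem.Dict Char (PySem.Set Char) :=
    (l.zip l.tail).foldl
      (fun d ab => d.modify ab.1 PySem.Set.empty (fun s => s.add ab.2)) PySem.Dict.empty
  -- p[-1] / p[0] raise IndexError on p = "" (excluded by Pre_)
  match PySem.Str.pyGet? p (-1) with
  | none => []
  | some last =>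
    match PySem.Str.pyGet? p 0 with
    | none => []
    | some first =>
      let heads := PySem.Set.diff (PySem.Set.ofList l) [last]
      let tails := PySem.Set.diff (PySem.Set.ofList l) [first]
      heads.foldl
        (fun (res : PySem.Set String) c1 =>
          (PySem.Set.diff tails (succ.getD c1 PySem.Set.empty)).foldl
            (fun (res : PySem.Set String) c2 => res.add (String.ofList [c1, c2])) res)
        PySem.Set.empty

-- ===== PRECONDITION & SPEC =====
-- Pre_ excludes only the empty string, on which A raises IndexError at p[0].
def Pre_get_non_repeating (p : String) : Prop := p ≠ ""
instance (p : String) : Decidable (Pre_get_non_repeating p) := by unfold Pre_get_non_repeating; infer_instance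
def pvWitness_get_non_repeating : String := "abcab"

def Spec_get_non_repeating (p : String) (out : List String) : Prop := out = get_non_repeating_alt p
instance (p : String) (out : List String) : Decidable (Spec_get_non_repeating p out) := by unfold Spec_get_non_repeating; infer_instance

-- ===== CLAIM (what is proved, stated in full; the proofs are below) =====
def Claim_equal_get_non_repeating : Prop := ∀ (p : String), Dom_get_non_repeating p → Pre_get_non_repeating p → Spec_get_non_repeating p (get_non_repeating p)

-- ===== LEMMAS AND PROOFS =====

-- a two-character string is a substring of l exactly when it is an adjacent pair of l
lemma pv_pair_mem_zip_iff_infix (l : List Char) (a b : Char) :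
    (a, b) ∈ l.zip l.tail ↔ [a, b] <:+: l := by
  induction l with
  | nil => simp
  | cons x t ih =>
    cases t with
    | nil =>
      simp only [List.tail_cons, List.zip_nil_right, List.not_mem_nil, false_iff]
      intro h
      have := h.length_le
      simp at this
    | cons y t' =>
      rw [List.infix_cons_iff]
      constructor
      · intro h
        rcases List.mem_cons.mp h with h | h
        · left; injection h with h1 h2; subst h1; subst h2
          exact ⟨t', rfl⟩
        · right; exact (ih).mp h
      · rintro (h | h)
        · rcases h with ⟨u, hu⟩
          simp only [List.cons_append, List.nil_append] at hu
          injection hu with h1 hu2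
          injection hu2 with h2 _
          subst h1; subst h2
          exact List.mem_cons_self
        · exact List.mem_cons_of_mem _ ((ih).mpr h)

-- membership in B's successor map is A's substring test
lemma pv_succ_getD_mem (zs : List (Char × Char)) (d : PySem.Dict Char (PySem.Set Char)) (x y : Char) :
    (y ∈ (zs.foldl (fun d ab => d.modify ab.1 PySem.Set.empty (fun s => s.add ab.2)) d).getD x PySem.Set.empty
      ↔ y ∈ d.getD x PySem.Set.empty ∨ (x, y) ∈ zs) := by
  induction zs generalizing d with
  | nil => simp
  | cons ab t ih =>
    obtain ⟨a0, b0⟩ := ab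
    rw [List.foldl_cons, ih, PySem.Dict.getD_modify]
    by_cases hx : x = a0
    · subst hx
      rw [if_pos rfl]
      simp only [PySem.Set.mem_add, List.mem_cons, Prod.mk.injEq, true_and]
      tauto
    · rw [if_neg hx]
      simp only [List.mem_cons, Prod.mk.injEq]
      tauto

lemma pv_contains_succ (l : List Char) (a b : Char) :
    (((l.zip l.tail).foldl
        (fun d ab => d.modify ab.1 PySem.Set.empty (fun s => s.add ab.2))
        PySem.Dict.empty).getD a PySem.Set.empty).contains b
      = PySem.Chars.isIn [a, b] l := by
  apply Bool.eq_iff_iff.mpr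
  rw [PySem.Set.contains_iff, PySem.Chars.isIn_iff_infix,
    pv_succ_getD_mem (l.zip l.tail) PySem.Dict.empty a b]
  simp only [PySem.Dict.getD_empty]
  constructor
  · rintro (h | h)
    · exact absurd h (by simp [PySem.Set.empty])
    · exact (pv_pair_mem_zip_iff_infix l a b).mp h
  · intro h
    exact Or.inr ((pv_pair_mem_zip_iff_infix l a b).mpr h)

-- updating with already-present elements is the identity
lemma pv_update_absorb {α : Type} [BEq α] [LawfulBEq α] (s : PySem.Set α) (xs : List α)
    (h : ∀ x ∈ xs, x ∈ s) : s.update xs = s := by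
  rw [PySem.Set.update_eq_append_filter]
  have hnil : List.filter (fun y => !s.contains y) (PySem.Set.ofList xs) = [] := by
    apply List.filter_eq_nil_iff.mpr
    intro y hy
    have hys : y ∈ s := h y ((PySem.Set.mem_ofList xs y).mp hy)
    simp [hys]
  rw [hnil, List.append_nil]

-- a loop of set-updates is one update with the concatenation
lemma pv_foldl_update {α β : Type} [BEq β] (f : α → List β) (l : List α) (s : PySem.Set β) :
    l.foldl (fun s c => s.update (f c)) s = s.update (l.flatMap f) := by
  induction l generalizing s with
  | nil => simp [PySem.Set.update_nil]
  | cons c t ih => simp only [List.foldl_cons, List.flatMap_cons, PySem.Set.update_append, ih]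

-- dropping the occurrences of c from the outer list does not change the update,
-- provided c's block is already contained in the accumulator
lemma pv_update_flatMap_filter {α β : Type} [BEq α] [LawfulBEq α] [BEq β] [LawfulBEq β]
    (f : α → List β) (c : α) (u : List α) (s : PySem.Set β) (h : ∀ y ∈ f c, y ∈ s) :
    s.update (u.flatMap f) = s.update ((u.filter (fun x => !(x == c))).flatMap f) := by
  induction u generalizing s with
  | nil => rfl
  | cons d u' ih =>
    by_cases hd : d = c
    · subst hd
      rw [List.flatMap_cons, PySem.Set.update_append, pv_update_absorb s (f d) h,
        List.filter_cons_of_neg (by simp), ih s h]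
    · rw [List.filter_cons_of_pos (by simp [hd]), List.flatMap_cons, List.flatMap_cons,
        PySem.Set.update_append, PySem.Set.update_append]
      exact ih _ (fun y hy => (PySem.Set.mem_update s (f d) y).mpr (Or.inl (h y hy)))

-- deduplicating the outer list does not change the update
lemma pv_update_flatMap_dedup {α β : Type} [BEq α] [LawfulBEq α] [BEq β] [LawfulBEq β]
    (f : α → List β) (l : List α) (s : PySem.Set β) :
    s.update (l.flatMap f) = s.update ((PySem.List.dedup l).flatMap f) := by
  induction l generalizing s with
  | nil => rfl
  | cons c t ih =>
    have hd : PySem.List.dedup (c :: t) = c :: (PySem.List.dedup t).filter (fun y => !(y == c)) := by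
      simp only [PySem.List.dedup_eq_ofList, PySem.Set.ofList_cons]
      rfl
    rw [hd]
    simp only [List.flatMap_cons, PySem.Set.update_append]
    rw [ih]
    apply pv_update_flatMap_filter
    intro y hy
    exact (PySem.Set.mem_update s (f c) y).mpr (Or.inr hy)

-- ofList of a flatMap only depends on each block up to ofList
lemma pv_ofList_flatMap_congr {α β : Type} [BEq β] [LawfulBEq β] (f g : α → List β) (u : List α)
    (h : ∀ c ∈ u, PySem.Set.ofList (f c) = PySem.Set.ofList (g c)) :
    PySem.Set.ofList (u.flatMap f) = PySem.Set.ofList (u.flatMap g) := by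
  induction u with
  | nil => rfl
  | cons c t ih =>
    simp only [List.flatMap_cons, PySem.Set.ofList_append, PySem.Set.update_eq_append_filter]
    rw [h c (List.mem_cons_self), ih (fun d hd => h d (List.mem_cons_of_mem c hd))]

-- ofList commutes with filter
lemma pv_ofList_filter {α : Type} [BEq α] [LawfulBEq α] (q : α → Bool) (l : List α) :
    PySem.Set.ofList (l.filter q) = (PySem.Set.ofList l).filter q := by
  induction l with
  | nil => rfl
  | cons x t ih =>
    rw [PySem.Set.ofList_cons]
    cases hq : q x with
    | false =>
      rw [List.filter_cons_of_neg (by simp [hq]), ih, List.filter_cons_of_neg (by simp [hq])]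
      simp only [PySem.Set.discard, List.filter_filter]
      apply List.filter_congr
      intro y _
      by_cases hyx : y = x
      · subst hyx; simp [hq]
      · simp [hyx]
    | true =>
      rw [List.filter_cons_of_pos (by simp [hq]), PySem.Set.ofList_cons,
        List.filter_cons_of_pos (by simp [hq]), ih]
      simp only [PySem.Set.discard, List.filter_filter]
      congr 1
      apply List.filter_congr
      intro y _
      rw [Bool.and_comm]

-- ofList commutes with an injective map
lemma pv_ofList_map_inj {α β : Type} [BEq α] [LawfulBEq α] [BEq β] [LawfulBEq β]
    (f : α → β) (hf : Function.Injective f) (l : List α) :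
    PySem.Set.ofList (l.map f) = (PySem.Set.ofList l).map f := by
  induction l with
  | nil => rfl
  | cons x t ih =>
    rw [List.map_cons, PySem.Set.ofList_cons, PySem.Set.ofList_cons, List.map_cons, ih]
    simp only [PySem.Set.discard, List.filter_map]
    congr 2
    apply List.filter_congr
    intro y _
    by_cases hyx : y = x
    · subst hyx; simp
    · have hfy : f y ≠ f x := fun hc => hyx (hf hc)
      simp [Function.comp, hyx, hfy]

-- A's nested fold, projected to not_allowed, is ofList of one flatMap
lemma pv_A_shape (l : List Char) (first_char last_char : Char) :
    (l.foldl
        (fun (st : PySem.Set String × PySem.Set String) c1 =>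
          if c1 == last_char then st
          else l.foldl
            (fun (st : PySem.Set String × PySem.Set String) c2 =>
              if c2 == first_char then (st.1, st.2.add (String.ofList [c1, c2]))
              else if PySem.Chars.isIn [c1, c2] l then (st.1, st.2.add (String.ofList [c1, c2]))
              else (st.1.add (String.ofList [c1, c2]), st.2)) st)
        (PySem.Set.empty, PySem.Set.empty)).1
    = PySem.Set.ofList (l.flatMap (fun c1 =>
        if c1 == last_char then []
        else (l.filter (fun c2 =>
            !(c2 == first_char) && !(PySem.Chars.isIn [c1, c2] l))).map
          (fun c2 => String.ofList [c1, c2]))) := by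
  have hinner : ∀ c1 : Char,
      (fun (st : PySem.Set String × PySem.Set String) c2 =>
        if c2 == first_char then (st.1, st.2.add (String.ofList [c1, c2]))
        else if PySem.Chars.isIn [c1, c2] l then (st.1, st.2.add (String.ofList [c1, c2]))
        else (st.1.add (String.ofList [c1, c2]), st.2))
      = (fun (st : PySem.Set String × PySem.Set String) c2 =>
        (if !(c2 == first_char) && !(PySem.Chars.isIn [c1, c2] l)
           then st.1.add (String.ofList [c1, c2]) else st.1,
         if (c2 == first_char) || PySem.Chars.isIn [c1, c2] l
           then st.2.add (String.ofList [c1, c2]) else st.2)) := by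
    intro c1
    funext st c2
    cases h1 : (c2 == first_char) <;> cases h2 : PySem.Chars.isIn [c1, c2] l <;> simp
  have houter :
      (fun (st : PySem.Set String × PySem.Set String) c1 =>
        if c1 == last_char then st
        else l.foldl
          (fun (st : PySem.Set String × PySem.Set String) c2 =>
            if c2 == first_char then (st.1, st.2.add (String.ofList [c1, c2]))
            else if PySem.Chars.isIn [c1, c2] l then (st.1, st.2.add (String.ofList [c1, c2]))
            else (st.1.add (String.ofList [c1, c2]), st.2)) st)
      = (fun (st : PySem.Set String × PySem.Set String) c1 =>
        (if c1 == last_char then st.1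
         else l.foldl (fun (s : PySem.Set String) c2 =>
           if !(c2 == first_char) && !(PySem.Chars.isIn [c1, c2] l)
             then s.add (String.ofList [c1, c2]) else s) st.1,
         if c1 == last_char then st.2
         else l.foldl (fun (s : PySem.Set String) c2 =>
           if (c2 == first_char) || PySem.Chars.isIn [c1, c2] l
             then s.add (String.ofList [c1, c2]) else s) st.2)) := by
    funext st c1
    obtain ⟨s1, s2⟩ := st
    cases h : (c1 == last_char) with
    | true => simp
    | false =>
      simp only [Bool.false_eq_true, if_false]
      rw [hinner c1]
      exact PySem.List.foldl_prod_mk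
        (f := fun (s : PySem.Set String) c2 =>
          if !(c2 == first_char) && !(PySem.Chars.isIn [c1, c2] l)
            then s.add (String.ofList [c1, c2]) else s)
        (g := fun (s : PySem.Set String) c2 =>
          if (c2 == first_char) || PySem.Chars.isIn [c1, c2] l
            then s.add (String.ofList [c1, c2]) else s) l s1 s2
  rw [houter]
  rw [PySem.List.foldl_prod_mk
    (f := fun (s : PySem.Set String) c1 =>
      if c1 == last_char then s
      else l.foldl (fun (s : PySem.Set String) c2 =>
        if !(c2 == first_char) && !(PySem.Chars.isIn [c1, c2] l)
          then s.add (String.ofList [c1, c2]) else s) s)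
    (g := fun (s : PySem.Set String) c1 =>
      if c1 == last_char then s
      else l.foldl (fun (s : PySem.Set String) c2 =>
        if (c2 == first_char) || PySem.Chars.isIn [c1, c2] l
          then s.add (String.ofList [c1, c2]) else s) s)]
  show List.foldl _ PySem.Set.empty l = _
  have hF1 : (fun (s : PySem.Set String) c1 =>
      if c1 == last_char then s
      else l.foldl (fun (s : PySem.Set String) c2 =>
        if !(c2 == first_char) && !(PySem.Chars.isIn [c1, c2] l)
          then s.add (String.ofList [c1, c2]) else s) s)
      = (fun (s : PySem.Set String) c1 => s.update
          (if c1 == last_char then []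
           else (l.filter (fun c2 =>
              !(c2 == first_char) && !(PySem.Chars.isIn [c1, c2] l))).map
             (fun c2 => String.ofList [c1, c2]))) := by
    funext s c1
    cases h : (c1 == last_char) with
    | true => simp [PySem.Set.update_nil]
    | false =>
      simp only [Bool.false_eq_true, if_false]
      rw [PySem.List.foldl_if_eq_foldl_filter
        (fun c2 => !(c2 == first_char) && !(PySem.Chars.isIn [c1, c2] l))
        (fun (s : PySem.Set String) c2 => s.add (String.ofList [c1, c2])) l s,
        ← PySem.Set.update_map_eq_foldl_add]
  rw [hF1, pv_foldl_update, PySem.Set.update_empty]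

-- a flatMap whose guarded branch yields [] is a flatMap over the filtered list
lemma pv_flatMap_if_nil {α β : Type} (pb : α → Bool) (g : α → List β) (u : List α) :
    u.flatMap (fun x => if pb x then [] else g x) = (u.filter (fun x => !pb x)).flatMap g := by
  induction u with
  | nil => rfl
  | cons x t ih =>
    cases h : pb x <;> simp [List.flatMap_cons, h, ih]

-- set difference with a singleton is a filter of the deduplicated list
lemma pv_diff_singleton (l : List Char) (c : Char) :
    PySem.Set.diff (PySem.Set.ofList l) [c] = (PySem.List.dedup l).filter (fun x => !(x == c)) := by
  rw [PySem.List.dedup_eq_ofList]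
  simp only [PySem.Set.diff]
  apply List.filter_congr
  intro y _
  by_cases hy : y = c
  · subst hy; simp
  · simp [hy]

-- replacing the inner filter base by the full list does not change the set
lemma pv_block' (l : List Char) (q : Char → Bool) (c1 : Char) :
    PySem.Set.ofList ((l.filter q).map (fun c2 => String.ofList [c1, c2]))
    = PySem.Set.ofList (((PySem.List.dedup l).filter q).map (fun c2 => String.ofList [c1, c2])) := by
  have hinj : Function.Injective (fun c2 => String.ofList [c1, c2]) := by
    intro a b hab
    simpa using String.ofList_inj.mp hab
  rw [pv_ofList_map_inj _ hinj, pv_ofList_map_inj _ hinj, pv_ofList_filter, pv_ofList_filter,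
    PySem.List.dedup_eq_ofList, PySem.Set.ofList_ofList]

-- a nested add-loop over head/tail lists is one ofList of a flatMap
lemma pv_nested_fold (outer : List Char) (inner : Char → List Char) :
    outer.foldl (fun (res : PySem.Set String) c1 =>
        (inner c1).foldl (fun (res : PySem.Set String) c2 => res.add (String.ofList [c1, c2])) res)
      PySem.Set.empty
    = PySem.Set.ofList (outer.flatMap (fun c1 =>
        (inner c1).map (fun c2 => String.ofList [c1, c2]))) := by
  have h1 : (fun (res : PySem.Set String) c1 =>
      (inner c1).foldl (fun (res : PySem.Set String) c2 => res.add (String.ofList [c1, c2])) res)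
      = (fun (res : PySem.Set String) c1 =>
        res.update ((inner c1).map (fun c2 => String.ofList [c1, c2]))) := by
    funext res c1
    rw [PySem.Set.update_map_eq_foldl_add]
  rw [h1, pv_foldl_update, PySem.Set.update_empty]

-- the whole some/some branch of both ports
lemma pv_main (p : String) (first last : Char) :
    (p.toList.foldl
        (fun (st : PySem.Set String × PySem.Set String) c1 =>
          if c1 == last then st
          else p.toList.foldl
            (fun (st : PySem.Set String × PySem.Set String) c2 =>
              if c2 == first then (st.1, st.2.add (String.ofList [c1, c2]))
              else if PySem.Str.isIn (String.ofList [c1, c2]) p then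
                (st.1, st.2.add (String.ofList [c1, c2]))
              else (st.1.add (String.ofList [c1, c2]), st.2)) st)
        (PySem.Set.empty, PySem.Set.empty)).1
    = (PySem.Set.diff (PySem.Set.ofList p.toList) [last]).foldl
        (fun (res : PySem.Set String) c1 =>
          (PySem.Set.diff (PySem.Set.diff (PySem.Set.ofList p.toList) [first])
              (((p.toList.zip p.toList.tail).foldl
                  (fun d ab => d.modify ab.1 PySem.Set.empty (fun s => s.add ab.2))
                  PySem.Dict.empty).getD c1 PySem.Set.empty)).foldl
            (fun (res : PySem.Set String) c2 => res.add (String.ofList [c1, c2])) res)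
        PySem.Set.empty := by
  -- A side: one ofList of a flatMap over the deduplicated characters without the last char
  simp only [PySem.Str.isIn_eq, String.toList_ofList]
  rw [pv_A_shape p.toList first last]
  rw [← PySem.Set.update_nil_left (p.toList.flatMap _), pv_update_flatMap_dedup,
    PySem.Set.update_nil_left]
  rw [pv_flatMap_if_nil (fun c1 => c1 == last)
    (fun c1 => (p.toList.filter (fun c2 =>
        !(c2 == first) && !(PySem.Chars.isIn [c1, c2] p.toList))).map
      (fun c2 => String.ofList [c1, c2])) (PySem.List.dedup p.toList)]
  -- B side: the nested fold is one ofList of a flatMap over the same outer list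
  rw [pv_nested_fold (PySem.Set.diff (PySem.Set.ofList p.toList) [last])
    (fun c1 => PySem.Set.diff (PySem.Set.diff (PySem.Set.ofList p.toList) [first])
      (((p.toList.zip p.toList.tail).foldl
          (fun d ab => d.modify ab.1 PySem.Set.empty (fun s => s.add ab.2))
          PySem.Dict.empty).getD c1 PySem.Set.empty))]
  rw [pv_diff_singleton p.toList last]
  -- compare the two flatMaps blockwise
  apply pv_ofList_flatMap_congr
  intro c1 _
  rw [pv_block' p.toList (fun c2 => !(c2 == first) && !(PySem.Chars.isIn [c1, c2] p.toList)) c1]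
  congr 1
  rw [pv_diff_singleton p.toList first]
  simp only [PySem.Set.diff, List.filter_filter]
  congr 1
  apply List.filter_congr
  intro c2 _
  rw [PySem.Set.contains_eq_listContains]
  have : (((p.toList.zip p.toList.tail).foldl
      (fun d ab => d.modify ab.1 PySem.Set.empty (fun s => s.add ab.2))
      PySem.Dict.empty).getD c1 PySem.Set.empty).contains c2 = PySem.Chars.isIn [c1, c2] p.toList :=
    pv_contains_succ p.toList c1 c2
  rw [PySem.Set.contains_eq_listContains] at this
  rw [this, Bool.and_comm]

-- ===== VERDICT (by name: the statement is the Claim_ definition above) =====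
theorem get_non_repeating_spec : Claim_equal_get_non_repeating := by
  unfold Claim_equal_get_non_repeating
  intro p _ _
  unfold Spec_get_non_repeating get_non_repeating get_non_repeating_alt
  cases h1 : PySem.Str.pyGet? p (-1) with
  | none => cases h0 : PySem.Str.pyGet? p 0 <;> rfl
  | some last =>
    cases h0 : PySem.Str.pyGet? p 0 with
    | none => rfl
    | some first => exact pv_main p first last
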